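-- pv_equiv track=rewrite | github.com/PAINUS79/gd4.5-AI | tools/ai_pipeline_daemon.py | classify_changes
-- ===== SOURCE A (Python) =====
-- from typing import Dict, List, Optional, Tuple
--
-- def classify_changes(changed: List[str]) -> dict:
--     if not changed:
--         return {"should_gate": False, "should_brief": False}
--
--     should_gate = any(
--         p.endswith("current_task.yaml")
--         or p.endswith("memory_log.jsonl")
--         or p.endswith("package.json")
--         or p.endswith("sections_manifest.json")
--         or p.endswith("artifacts_manifest.json")
--         for p in changed
--     )
--
--     should_brief = any(
--         p.endswith("sections_manifest.json")
--         or p.endswith("artifacts_manifest.json")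
--         or p.endswith("current_task.yaml")
--         for p in changed
--     )
--
--     return {"should_gate": should_gate, "should_brief": should_brief}
-- ===== SOURCE B (Python) =====
-- GATE_SUFFIXES = ("current_task.yaml", "memory_log.jsonl", "package.json",
--                  "sections_manifest.json", "artifacts_manifest.json")
-- BRIEF_SUFFIXES = ("sections_manifest.json", "artifacts_manifest.json",
--                   "current_task.yaml")
--
-- def classify_changes(changed):
--     should_gate = False
--     should_brief = False
--     for p in changed:
--         if not should_gate and p.endswith(GATE_SUFFIXES):
--             should_gate = True
--         if not should_brief and p.endswith(BRIEF_SUFFIXES):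
--             should_brief = True
--         if should_gate and should_brief:
--             break
--     return {"should_gate": should_gate, "should_brief": should_brief}
-- ===== Notes on version B (the rewrite author's own statement) =====
-- stated objective: simpler
-- what changed: Replaces the empty-list guard plus two separate any() generator scans with one explicit loop that maintains both flags at once and breaks early once both are set (using tuple-argument endswith).
import Mathlib
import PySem

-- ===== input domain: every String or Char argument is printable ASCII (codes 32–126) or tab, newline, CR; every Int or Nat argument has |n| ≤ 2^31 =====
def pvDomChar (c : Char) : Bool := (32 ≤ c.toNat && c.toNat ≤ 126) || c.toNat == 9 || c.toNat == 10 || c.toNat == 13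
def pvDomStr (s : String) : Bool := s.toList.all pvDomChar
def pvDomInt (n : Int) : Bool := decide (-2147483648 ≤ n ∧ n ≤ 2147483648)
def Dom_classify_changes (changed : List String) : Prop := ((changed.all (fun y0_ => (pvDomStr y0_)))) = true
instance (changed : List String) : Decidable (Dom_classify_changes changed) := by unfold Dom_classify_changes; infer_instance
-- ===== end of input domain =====

-- B replaces A's empty-list guard and two separate any-scans with one loop keeping
-- both flags and breaking early when both are set (objective: simpler, single pass).


-- ===== PORT A =====
def classify_changes (changed : List String) : List (String × Bool) :=
  if changed = [] then [("should_gate", false), ("should_brief", false)]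
  else
    let should_gate := changed.any (fun p =>
      PySem.Str.endswith p "current_task.yaml"
      || PySem.Str.endswith p "memory_log.jsonl"
      || PySem.Str.endswith p "package.json"
      || PySem.Str.endswith p "sections_manifest.json"
      || PySem.Str.endswith p "artifacts_manifest.json")
    let should_brief := changed.any (fun p =>
      PySem.Str.endswith p "sections_manifest.json"
      || PySem.Str.endswith p "artifacts_manifest.json"
      || PySem.Str.endswith p "current_task.yaml")
    [("should_gate", should_gate), ("should_brief", should_brief)]

-- ===== PORT B =====
def pvGateSuffixes : List String :=
  ["current_task.yaml", "memory_log.jsonl", "package.json",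
   "sections_manifest.json", "artifacts_manifest.json"]

def pvBriefSuffixes : List String :=
  ["sections_manifest.json", "artifacts_manifest.json", "current_task.yaml"]

-- the for-loop of Source B: both flags carried, early break once both are true
def pvLoop : List String → Bool → Bool → Bool × Bool
  | [], g, b => (g, b)
  | p :: rest, g, b =>
    let g' := if !g && pvGateSuffixes.any (fun s => PySem.Str.endswith p s) then true else g
    let b' := if !b && pvBriefSuffixes.any (fun s => PySem.Str.endswith p s) then true else b
    if g' && b' then (g', b') else pvLoop rest g' b'

def classify_changes_alt (changed : List String) : List (String × Bool) :=
  let r := pvLoop changed false false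
  [("should_gate", r.1), ("should_brief", r.2)]

-- ===== PRECONDITION & SPEC =====
def Spec_classify_changes (changed : List String) (out : List (String × Bool)) : Prop := out = classify_changes_alt changed
instance (changed : List String) (out : List (String × Bool)) : Decidable (Spec_classify_changes changed out) := by unfold Spec_classify_changes; infer_instance

-- ===== CLAIM (what is proved, stated in full; the proofs are below) =====
def Claim_equal_classify_changes : Prop := ∀ (changed : List String), Dom_classify_changes changed → Spec_classify_changes changed (classify_changes changed)

-- ===== LEMMAS AND PROOFS =====

theorem pvLoop_eq (l : List String) (g b : Bool) :
    pvLoop l g b = (g || l.any (fun p => pvGateSuffixes.any (fun s => PySem.Str.endswith p s)),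
                    b || l.any (fun p => pvBriefSuffixes.any (fun s => PySem.Str.endswith p s))) := by
  induction l generalizing g b with
  | nil => simp [pvLoop]
  | cons p rest ih =>
    simp only [pvLoop, List.any_cons]
    rw [ih]
    generalize pvGateSuffixes.any (fun s => PySem.Str.endswith p s) = x
    generalize pvBriefSuffixes.any (fun s => PySem.Str.endswith p s) = y
    cases x <;> cases y <;> cases g <;> cases b <;> simp

-- ===== VERDICT (by name: the statement is the Claim_ definition above) =====
theorem classify_changes_spec : Claim_equal_classify_changes := by
  intro changed _
  have hgp : ∀ q : String,
      (PySem.Str.endswith q "current_task.yaml"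
        || PySem.Str.endswith q "memory_log.jsonl"
        || PySem.Str.endswith q "package.json"
        || PySem.Str.endswith q "sections_manifest.json"
        || PySem.Str.endswith q "artifacts_manifest.json")
      = pvGateSuffixes.any (fun s => PySem.Str.endswith q s) := fun q => by
    simp [pvGateSuffixes, Bool.or_assoc]
  have hbp : ∀ q : String,
      (PySem.Str.endswith q "sections_manifest.json"
        || PySem.Str.endswith q "artifacts_manifest.json"
        || PySem.Str.endswith q "current_task.yaml")
      = pvBriefSuffixes.any (fun s => PySem.Str.endswith q s) := fun q => by
    simp [pvBriefSuffixes, Bool.or_assoc]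
  unfold Spec_classify_changes classify_changes classify_changes_alt
  rw [pvLoop_eq]
  cases changed with
  | nil => simp
  | cons p rest =>
    simp only [if_neg (List.cons_ne_nil p rest), Bool.false_or, hgp, hbp]
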